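-- pv_equiv track=rewrite | github.com/ledetav/BaMoP2023 | homeworks/Python/Simple tasks/Netflix [simple]/netflix.py | buy_netflix
-- ===== SOURCE A (Python) =====
-- def buy_netflix(X, Y, Z, COST):
--     # Create a list of tuples containing the names and amounts of money for each person
--     people = [('Alice', X), ('Bob', Y), ('Charlie', Z)]
--
--     # Sort the list by amount of money in ascending order
--     people.sort(key=lambda x: x[1])
--
--     # Iterate through every combination of two people
--     for i in range(len(people)):
--         for j in range(i+1, len(people)):
--             # Calculate the total amount of money of the two people
--             total_money = people[i][1] + people[j][1]
--
--             # If the total amount is greater than or equal to the cost, return the two names with the minimum total amount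
--             if total_money >= COST:
--                 # Create a list of names of the two people
--                 names = [people[i][0], people[j][0]]
--                 # Sort the list of names alphabetically and return it
--                 return sorted(names)
-- ===== SOURCE B (Python) =====
-- def buy_netflix(X, Y, Z, COST):
--     # Fixed list of the three possible pairs, names already alphabetical.
--     pairs = [(X + Y, ['Alice', 'Bob']),
--              (X + Z, ['Alice', 'Charlie']),
--              (Y + Z, ['Bob', 'Charlie'])]
--     affordable = [p for p in pairs if p[0] >= COST]
--     if not affordable:
--         return None
--     return min(affordable, key=lambda p: p[0])[1]
-- ===== Notes on version B (the rewrite author's own statement) =====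
-- stated objective: simpler
-- what changed: Replaces the sort-by-money plus nested index loops with a fixed three-element candidate list, a filter on affordability, and a first-wins min by total (which reproduces A's stable tie-break).
import Mathlib
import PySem

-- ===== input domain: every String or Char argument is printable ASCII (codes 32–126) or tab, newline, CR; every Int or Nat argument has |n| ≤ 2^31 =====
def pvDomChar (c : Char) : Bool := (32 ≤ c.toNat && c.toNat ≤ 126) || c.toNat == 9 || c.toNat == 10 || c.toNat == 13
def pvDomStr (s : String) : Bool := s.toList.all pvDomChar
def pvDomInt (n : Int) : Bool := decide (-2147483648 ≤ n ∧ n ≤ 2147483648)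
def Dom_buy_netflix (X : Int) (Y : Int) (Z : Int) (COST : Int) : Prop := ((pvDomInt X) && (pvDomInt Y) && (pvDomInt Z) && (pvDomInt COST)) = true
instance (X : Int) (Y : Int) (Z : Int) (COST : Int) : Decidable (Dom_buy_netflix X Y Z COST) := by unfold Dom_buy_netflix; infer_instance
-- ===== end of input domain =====

-- B replaces A's sort + nested index loops by a fixed candidate list, a filter, and a first-wins min by total (objective: simpler); same return value everywhere.
-- ===== PORT A =====
-- inner 'for j' loop of A: first affordable pair for this i, else none
def pvLoopJ_buy_netflix (people : List (String × Int)) (COST : Int) (i : Int) :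
    List Int → Option (List String)
  | [] => none
  | j :: js =>
    let pi := PySem.List.pyGetD people i ("", 0)
    let pj := PySem.List.pyGetD people j ("", 0)
    let total_money := pi.2 + pj.2
    if total_money ≥ COST then
      some (PySem.List.sorted [pi.1, pj.1] (fun s => s) false)
    else
      pvLoopJ_buy_netflix people COST i js

-- outer 'for i' loop of A
def pvLoopI_buy_netflix (people : List (String × Int)) (COST : Int) :
    List Int → Option (List String)
  | [] => none
  | i :: is =>
    match pvLoopJ_buy_netflix people COST i
        (PySem.List.pyRange (i + 1) (people.length : Int) 1) with
    | some r => some r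
    | none => pvLoopI_buy_netflix people COST is

def buy_netflix (X : Int) (Y : Int) (Z : Int) (COST : Int) : Option (List String) :=
  let people := PySem.List.sorted [("Alice", X), ("Bob", Y), ("Charlie", Z)] (fun p => p.2) false
  pvLoopI_buy_netflix people COST (PySem.List.pyRange 0 (people.length : Int) 1)

-- ===== PORT B =====
def buy_netflix_alt (X : Int) (Y : Int) (Z : Int) (COST : Int) : Option (List String) :=
  let pairs : List (Int × List String) :=
    [(X + Y, ["Alice", "Bob"]), (X + Z, ["Alice", "Charlie"]), (Y + Z, ["Bob", "Charlie"])]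
  let affordable := pairs.filter (fun p => decide (p.1 ≥ COST))
  match PySem.List.min? affordable (fun p => p.1) with
  | none => none
  | some p => some p.2

-- ===== PRECONDITION & SPEC =====
def Spec_buy_netflix (X : Int) (Y : Int) (Z : Int) (COST : Int) (out : Option (List String)) : Prop := out = buy_netflix_alt X Y Z COST
instance (X : Int) (Y : Int) (Z : Int) (COST : Int) (out : Option (List String)) : Decidable (Spec_buy_netflix X Y Z COST out) := by unfold Spec_buy_netflix; infer_instance

-- ===== CLAIM (what is proved, stated in full; the proofs are below) =====
def Claim_equal_buy_netflix : Prop := ∀ (X : Int) (Y : Int) (Z : Int) (COST : Int), Dom_buy_netflix X Y Z COST → Spec_buy_netflix X Y Z COST (buy_netflix X Y Z COST)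

-- ===== LEMMAS AND PROOFS =====

-- evaluation of A's inner loop for each starting index, on a literal 3-person list
theorem pvLoopJ0 (p q r : String × Int) (COST : Int) :
    pvLoopJ_buy_netflix [p, q, r] COST 0 [1, 2] =
      if COST ≤ p.2 + q.2 then some (PySem.List.sorted [p.1, q.1] (fun s => s) false)
      else if COST ≤ p.2 + r.2 then some (PySem.List.sorted [p.1, r.1] (fun s => s) false)
      else none := by
  simp [pvLoopJ_buy_netflix, PySem.List.pyGetD, PySem.List.pyGet?, PySem.List.pyIdx?]

theorem pvLoopJ1 (p q r : String × Int) (COST : Int) :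
    pvLoopJ_buy_netflix [p, q, r] COST 1 [2] =
      if COST ≤ q.2 + r.2 then some (PySem.List.sorted [q.1, r.1] (fun s => s) false)
      else none := by
  simp [pvLoopJ_buy_netflix, PySem.List.pyGetD, PySem.List.pyGet?, PySem.List.pyIdx?]

-- evaluation of A's full double loop on a literal 3-person list
theorem pvLoopI_eval (p q r : String × Int) (COST : Int) :
    pvLoopI_buy_netflix [p, q, r] COST [0, 1, 2] =
      if COST ≤ p.2 + q.2 then some (PySem.List.sorted [p.1, q.1] (fun s => s) false)
      else if COST ≤ p.2 + r.2 then some (PySem.List.sorted [p.1, r.1] (fun s => s) false)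
      else if COST ≤ q.2 + r.2 then some (PySem.List.sorted [q.1, r.1] (fun s => s) false)
      else none := by
  have hr1 : PySem.List.pyRange (0 + 1) (3 : Int) 1 = [1, 2] := by decide
  have hr2 : PySem.List.pyRange (1 + 1) (3 : Int) 1 = [2] := by decide
  have hr3 : PySem.List.pyRange (2 + 1) (3 : Int) 1 = [] := by decide
  have hl : (((0 + 1 + 1 + 1 : Nat)) : Int) = 3 := by norm_num
  simp only [pvLoopI_buy_netflix, List.length_cons, List.length_nil, hl,
    hr1, hr2, hr3, pvLoopJ0, pvLoopJ1]
  split_ifs <;> rfl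

-- sorted of a two-string list, resolved by one comparison (String '<' via toList)
theorem pvSort2_lt {a b : String} (h : a < b) :
    PySem.List.sorted [a, b] (fun s => s) false = [a, b] := by
  apply PySem.List.sorted_eq_of_perm_of_pairwise_lt
  · exact List.Perm.refl _
  · simp [← String.lt_iff_toList_lt, h]
theorem pvSort2_gt {a b : String} (h : a < b) :
    PySem.List.sorted [b, a] (fun s => s) false = [a, b] := by
  apply PySem.List.sorted_eq_of_perm_of_pairwise_lt
  · exact List.Perm.swap _ _ _
  · simp [← String.lt_iff_toList_lt, h]

theorem pvAB : ("Alice" : String) < "Bob" := by rw [String.lt_iff_toList_lt]; decide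
theorem pvAC : ("Alice" : String) < "Charlie" := by rw [String.lt_iff_toList_lt]; decide
theorem pvBC : ("Bob" : String) < "Charlie" := by rw [String.lt_iff_toList_lt]; decide

-- the sort of the three two-name lists A can build
theorem pvSortAB : PySem.List.sorted ["Alice", "Bob"] (fun s => s) false = ["Alice", "Bob"] := pvSort2_lt pvAB
theorem pvSortBA : PySem.List.sorted ["Bob", "Alice"] (fun s => s) false = ["Alice", "Bob"] := pvSort2_gt pvAB
theorem pvSortAC : PySem.List.sorted ["Alice", "Charlie"] (fun s => s) false = ["Alice", "Charlie"] := pvSort2_lt pvAC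
theorem pvSortCA : PySem.List.sorted ["Charlie", "Alice"] (fun s => s) false = ["Alice", "Charlie"] := pvSort2_gt pvAC
theorem pvSortBC : PySem.List.sorted ["Bob", "Charlie"] (fun s => s) false = ["Bob", "Charlie"] := pvSort2_lt pvBC
theorem pvSortCB : PySem.List.sorted ["Charlie", "Bob"] (fun s => s) false = ["Bob", "Charlie"] := pvSort2_gt pvBC

-- closed-form evaluation of B (filter + first-wins min on the three candidates)
theorem pvAltEval (X Y Z COST : Int) :
    buy_netflix_alt X Y Z COST =
      if COST ≤ X + Y then
        if COST ≤ X + Z then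
          if COST ≤ Y + Z then
            if X + Z < X + Y then
              (if Y + Z < X + Z then some ["Bob", "Charlie"] else some ["Alice", "Charlie"])
            else
              (if Y + Z < X + Y then some ["Bob", "Charlie"] else some ["Alice", "Bob"])
          else
            (if X + Z < X + Y then some ["Alice", "Charlie"] else some ["Alice", "Bob"])
        else
          if COST ≤ Y + Z then
            (if Y + Z < X + Y then some ["Bob", "Charlie"] else some ["Alice", "Bob"])
          else some ["Alice", "Bob"]
      else
        if COST ≤ X + Z then
          if COST ≤ Y + Z then
            (if Y + Z < X + Z then some ["Bob", "Charlie"] else some ["Alice", "Charlie"])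
          else some ["Alice", "Charlie"]
        else
          if COST ≤ Y + Z then some ["Bob", "Charlie"] else none := by
  by_cases c1 : COST ≤ X + Y <;> by_cases c2 : COST ≤ X + Z <;> by_cases c3 : COST ≤ Y + Z <;>
    by_cases m1 : X + Z < X + Y <;> by_cases m2 : Y + Z < X + Z <;> by_cases m3 : Y + Z < X + Y <;>
    simp only [buy_netflix_alt, List.filter, PySem.List.min?, List.foldl, c1, c2, c3, m1, m2, m3,
      ge_iff_le, decide_true, decide_false, if_true, if_false, ite_true, ite_false]

set_option maxHeartbeats 1000000 in
theorem pvMain (X Y Z COST : Int) : buy_netflix X Y Z COST = buy_netflix_alt X Y Z COST := by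
  simp only [buy_netflix, PySem.List.sorted_eq_foldl_insertBy]
  rw [pvAltEval]
  by_cases h1 : Y < X <;> by_cases h2 : Z < X <;> by_cases h3 : Z < Y <;>
    simp only [List.foldl, PySem.List.insertBy, h1, h2, h3, decide_true, decide_false,
      Bool.false_eq_true, if_true, if_false, ite_true, ite_false, List.length_cons,
      List.length_nil] <;>
    rw [(by norm_num : (((0 + 1 + 1 + 1 : Nat)) : Int) = 3)] <;>
    rw [(by decide : PySem.List.pyRange 0 (3 : Int) 1 = [0, 1, 2]), pvLoopI_eval] <;>
    simp only [pvSortAB, pvSortBA, pvSortAC, pvSortCA, pvSortBC, pvSortCB] <;>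
    split_ifs <;> first | rfl | omega

-- ===== VERDICT (by name: the statement is the Claim_ definition above) =====
theorem buy_netflix_spec : Claim_equal_buy_netflix := by
  intro X Y Z COST _
  exact pvMain X Y Z COST
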